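-- pv_equiv track=rewrite | github.com/IntelektualProjects/APPythonLab | EulerProject/Euler Problem Solutions/Problem 35.py | rotations
-- ===== SOURCE A (Python) =====
-- def digit_count(num):
--     count = 0
--     for x in str(num):
--         count += 1
--     return count
--
-- def rotations(num):
--     rotation_list = []
--     digits = digit_count(num)
--     tenth_power = 10 ** (digits - 1)
--
--     for i in range(1, digits):
--         first_digit = num // tenth_power
--         leftward = (num * 10 + first_digit) - (first_digit * tenth_power * 10)
--         rotation_list.append(leftward)
--         num = leftward
--
--     return rotation_list
-- ===== SOURCE B (Python) =====
-- def rotations(num):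
--     # Each left-rotation computed directly from the original number by one
--     # divmod split, instead of A's iterated first-digit reconstruction.
--     digits = len(str(num))
--     return [(num % 10 ** (digits - i)) * 10 ** i + num // 10 ** (digits - i)
--             for i in range(1, digits)]
-- ===== Notes on version B (the rewrite author's own statement) =====
-- stated objective: simpler
-- what changed: Replaces the stateful loop (each rotation rebuilt from the previous one via first-digit extraction and an arithmetic reconstruction, plus a char-counting digit_count helper) with a stateless comprehension that computes every rotation independently from the original number by one divmod split at the rotation point.
-- outside the precondition, e.g. on rotations(-10): A returns [899, 998], B returns [899, -1]
import Mathlib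
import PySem

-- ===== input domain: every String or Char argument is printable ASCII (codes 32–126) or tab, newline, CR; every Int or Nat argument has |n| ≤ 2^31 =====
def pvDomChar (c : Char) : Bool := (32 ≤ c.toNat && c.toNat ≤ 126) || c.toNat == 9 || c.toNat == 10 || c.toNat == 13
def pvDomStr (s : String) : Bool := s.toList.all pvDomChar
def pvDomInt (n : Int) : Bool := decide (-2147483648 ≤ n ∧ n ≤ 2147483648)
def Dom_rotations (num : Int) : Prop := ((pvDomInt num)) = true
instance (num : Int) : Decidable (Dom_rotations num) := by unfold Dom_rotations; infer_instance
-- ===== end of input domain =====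

-- B replaces A's stateful rotate-and-reconstruct loop by a stateless per-index divmod formula (objective: simpler).

-- ===== PORT A =====
-- helper digit_count: count = 0; for x in str(num): count += 1
def digitCount (num : Int) : Int :=
  (PySem.Int.toChars num).foldl (fun count _ => count + 1) 0

def rotations (num : Int) : List Int :=
  let digits := digitCount num
  -- Python 10 ** (digits - 1); digits ≥ 1 always (str(num) is nonempty), so the exponent is a Nat
  let tenthPower : Int := 10 ^ (digits - 1).toNat
  ((PySem.List.pyRange 1 digits 1).foldl
    (fun (st : Int × List Int) _ =>
      let num := st.1
      let firstDigit := PySem.Int.floordiv num tenthPower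
      let leftward := num * 10 + firstDigit - firstDigit * tenthPower * 10
      (leftward, st.2 ++ [leftward]))
    (num, [])).2

-- ===== PORT B =====
def rotations_alt (num : Int) : List Int :=
  let digits : Int := PySem.Str.len (PySem.Int.toStr num)
  -- Python 10 ** (digits - i) and 10 ** i; for i in range(1, digits) both exponents are ≥ 0, so .toNat is exact
  (PySem.List.pyRange 1 digits 1).map
    (fun i => PySem.Int.mod num (10 ^ (digits - i).toNat) * 10 ^ i.toNat
      + PySem.Int.floordiv num (10 ^ (digits - i).toNat))

-- ===== PRECONDITION & SPEC =====
-- Pre_ excludes negative num: "digit rotations" are unspecified for a negative number, and there A's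
-- values (its digit_count counts the '-' sign as a digit) and B's values are both accidental and can differ.
def Pre_rotations (num : Int) : Prop := 0 ≤ num
instance (num : Int) : Decidable (Pre_rotations num) := by unfold Pre_rotations; infer_instance
def pvWitness_rotations : Int := (123)

def Spec_rotations (num : Int) (out : List Int) : Prop := out = rotations_alt num
instance (num : Int) (out : List Int) : Decidable (Spec_rotations num out) := by unfold Spec_rotations; infer_instance

-- ===== CLAIM (what is proved, stated in full; the proofs are below) =====
def Claim_equal_rotations : Prop := ∀ (num : Int), Dom_rotations num → Pre_rotations num → Spec_rotations num (rotations num)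

-- ===== LEMMAS AND PROOFS =====

-- exact decimal digit count by repeated division: (Nat.toDigits 10 n).length (Mathlib only bounds it)
def dlen (n : Nat) : Nat :=
  if n < 10 then 1 else dlen (n / 10) + 1
decreasing_by exact Nat.div_lt_self (by omega) (by omega)

lemma toDigitsCore_length_eq (f : Nat) : ∀ (n : Nat) (acc : List Char), n < f →
    (Nat.toDigitsCore 10 f n acc).length = dlen n + acc.length := by
  induction f with
  | zero => intro n acc h; omega
  | succ f ih =>
    intro n acc h
    rw [Nat.toDigitsCore]
    by_cases h10 : n / 10 = 0
    · have : n < 10 := by omega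
      simp [h10, dlen, this]; omega
    · have hn10 : ¬ n < 10 := by omega
      rw [if_neg h10, ih (n / 10) _ (by omega)]
      conv_rhs => rw [dlen]
      rw [if_neg hn10]
      simp; omega

lemma length_toDigits (n : Nat) : (Nat.toDigits 10 n).length = dlen n := by
  rw [Nat.toDigits, toDigitsCore_length_eq (n+1) n [] (by omega)]; simp

lemma dlen_pos (n : Nat) : 1 ≤ dlen n := by
  rw [dlen]; split <;> omega

lemma dlen_upper (n : Nat) : n < 10 ^ dlen n := by
  fun_induction dlen with
  | case1 n h => simpa using h
  | case2 n h ih =>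
    rw [pow_succ]
    calc n < (n / 10 + 1) * 10 := by omega
    _ ≤ 10 ^ dlen (n / 10) * 10 := by
        have := ih; exact Nat.mul_le_mul_right 10 (by omega)

-- the k-th left rotation of N read as a d-digit decimal number
def rot (N d k : Nat) : Nat := (N % 10 ^ (d - k)) * 10 ^ k + N / 10 ^ (d - k)

-- one step of A's loop sends rotation k to rotation k+1
lemma step_rot (N d k : Nat) (hN : N < 10 ^ d) (hk : k < d) :
    10 * (rot N d k % 10 ^ (d - 1)) + rot N d k / 10 ^ (d - 1) = rot N d (k + 1) := by
  have hd1 : d - k - 1 + k = d - 1 := by omega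
  set M' : Nat := 10 ^ (d - k - 1) with hM'
  have hM : 10 ^ (d - k) = M' * 10 := by rw [hM', ← pow_succ]; congr 1; omega
  have hT : 10 ^ (d - 1) = M' * 10 ^ k := by rw [hM', ← pow_add, hd1]
  set q : Nat := N / 10 ^ (d - k) with hq
  set r : Nat := N % 10 ^ (d - k) with hr
  set a : Nat := r / M' with ha
  set b : Nat := r % M' with hb
  have hM'pos : 0 < M' := Nat.pow_pos (by omega)
  have hrM : r < M' * 10 := by rw [← hM]; exact Nat.mod_lt _ (Nat.pow_pos (by omega))
  have halt : a < 10 := by rw [ha]; exact (Nat.div_lt_iff_lt_mul hM'pos).mpr (by omega)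
  have hblt : b < M' := Nat.mod_lt _ hM'pos
  have hqlt : q < 10 ^ k := by
    rw [hq]; apply Nat.div_lt_of_lt_mul
    calc N < 10 ^ d := hN
    _ = 10 ^ (d - k) * 10 ^ k := by rw [← pow_add]; congr 1; omega
  have hrab : r = a * M' + b := by rw [ha, hb]; exact (Nat.div_add_mod' r M').symm
  have hrotk : rot N d k = a * (M' * 10 ^ k) + (b * 10 ^ k + q) := by
    rw [rot, ← hq, ← hr, hrab]; ring
  have hs_lt : b * 10 ^ k + q < M' * 10 ^ k := by
    calc b * 10 ^ k + q < b * 10 ^ k + 10 ^ k := by omega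
    _ = (b + 1) * 10 ^ k := by ring
    _ ≤ M' * 10 ^ k := Nat.mul_le_mul_right _ (by omega)
  have hdiv : rot N d k / 10 ^ (d - 1) = a := by
    have hTpos : 0 < M' * 10 ^ k := Nat.mul_pos hM'pos (Nat.pow_pos (by omega))
    rw [hrotk, hT, Nat.add_comm, Nat.add_mul_div_right _ _ hTpos, Nat.div_eq_of_lt hs_lt, Nat.zero_add]
  have hmod : rot N d k % 10 ^ (d - 1) = b * 10 ^ k + q := by
    rw [hrotk, hT, Nat.add_comm, Nat.add_mul_mod_self_right, Nat.mod_eq_of_lt hs_lt]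
  rw [hdiv, hmod]
  have hMk1 : 10 ^ (d - (k + 1)) = M' := by rw [hM', show d - (k + 1) = d - k - 1 from by omega]
  have hNsplit : N = (10 * q + a) * M' + b := by
    have h1 : 10 ^ (d - k) * q + r = N := Nat.div_add_mod N (10 ^ (d - k))
    rw [← h1, hM, hrab]; ring
  have hmod' : N % M' = b := by
    rw [hNsplit, Nat.add_comm, Nat.add_mul_mod_self_right, Nat.mod_eq_of_lt hblt]
  have hdiv' : N / M' = 10 * q + a := by
    rw [hNsplit, Nat.add_comm, Nat.add_mul_div_right _ _ hM'pos, Nat.div_eq_of_lt hblt, Nat.zero_add]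
  rw [rot, hMk1, hmod', hdiv']
  ring

lemma foldl_count (l : List Char) : ∀ (c : Int),
    l.foldl (fun count _ => count + 1) c = c + l.length := by
  induction l with
  | nil => intro c; simp
  | cons x xs ih => intro c; simp [ih]; omega

lemma digitCount_eq (N : Nat) : digitCount (N : Int) = (dlen N : Int) := by
  rw [digitCount, foldl_count]
  have h : ¬ ((N : Int) < 0) := by omega
  simp [PySem.Int.toChars, h, length_toDigits]

lemma len_toStr_eq (N : Nat) : PySem.Str.len (PySem.Int.toStr (N : Int)) = (dlen N : Int) := by
  rw [PySem.Str.len_eq, PySem.Int.toList_toStr]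
  have h : ¬ ((N : Int) < 0) := by omega
  simp [PySem.Int.toChars, h, length_toDigits]

lemma rot_zero (N d : Nat) (hN : N < 10 ^ d) : rot N d 0 = N := by
  rw [rot, Nat.sub_zero, Nat.mod_eq_of_lt hN, Nat.div_eq_of_lt hN]
  ring

-- A's loop, unrolled: folding from rotation state k appends rotations k+1, k+2, …
lemma foldA (N d : Nat) (t : Int) (hN : N < 10 ^ d) (ht : t = ((10 ^ (d - 1) : Nat) : Int)) :
    ∀ (L : List Int) (k : Nat) (acc : List Int), k + L.length ≤ d →
    (L.foldl
      (fun (st : Int × List Int) _ =>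
        let num := st.1
        let firstDigit := PySem.Int.floordiv num t
        let leftward := num * 10 + firstDigit - firstDigit * t * 10
        (leftward, st.2 ++ [leftward]))
      (((rot N d k : Nat) : Int), acc))
    = (((rot N d (k + L.length) : Nat) : Int),
       acc ++ (List.range L.length).map (fun j => ((rot N d (k + 1 + j) : Nat) : Int))) := by
  intro L
  induction L with
  | nil => intro k acc _; simp
  | cons x xs ih =>
    intro k acc hle
    simp only [List.foldl_cons]
    have hk : k < d := by simp at hle; omega
    have hlw : ((rot N d k : Nat) : Int) * 10 + PySem.Int.floordiv ((rot N d k : Nat) : Int) t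
        - PySem.Int.floordiv ((rot N d k : Nat) : Int) t * t * 10
        = ((rot N d (k + 1) : Nat) : Int) := by
      rw [ht, PySem.Int.floordiv_natCast]
      have hxz : ((rot N d k : Nat) : Int)
          = ((rot N d k / 10 ^ (d - 1) : Nat) : Int) * ((10 ^ (d - 1) : Nat) : Int)
            + ((rot N d k % 10 ^ (d - 1) : Nat) : Int) := by
        exact_mod_cast congrArg (Nat.cast (R := Int)) (Nat.div_add_mod' (rot N d k) (10 ^ (d - 1))).symm
      have hez : ((rot N d (k + 1) : Nat) : Int)
          = 10 * ((rot N d k % 10 ^ (d - 1) : Nat) : Int) + ((rot N d k / 10 ^ (d - 1) : Nat) : Int) := by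
        exact_mod_cast congrArg (Nat.cast (R := Int)) (step_rot N d k hN hk).symm
      rw [hez]
      linear_combination 10 * hxz
    simp only [hlw]
    rw [ih (k + 1) (acc ++ [((rot N d (k + 1) : Nat) : Int)]) (by simp at hle ⊢; omega)]
    simp only [List.length_cons, Prod.mk.injEq]
    refine ⟨by rw [show k + (xs.length + 1) = k + 1 + xs.length from by omega], ?_⟩
    rw [List.append_assoc]
    congr 1
    rw [List.range_succ_eq_map, List.map_cons, List.map_map]
    simp only [List.singleton_append, List.cons.injEq]
    refine ⟨by norm_num, ?_⟩
    apply List.map_congr_left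
    intro j _
    simp only [Function.comp]
    rw [show k + 1 + (j + 1) = k + 1 + 1 + j from by omega]

-- ===== VERDICT (by name: the statement is the Claim_ definition above) =====
theorem rotations_spec : Claim_equal_rotations := by
  intro num _ hpre
  show rotations num = rotations_alt num
  obtain ⟨N, rfl⟩ : ∃ N : Nat, num = ↑N := ⟨num.toNat, (Int.toNat_of_nonneg hpre).symm⟩
  have hd1 : 1 ≤ dlen N := dlen_pos N
  have hN : N < 10 ^ dlen N := dlen_upper N
  have hcast10 : ∀ e : Nat, ((10 : Int) ^ e) = ((10 ^ e : Nat) : Int) := by intro e; push_cast; ring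
  have hA : rotations (N : Int)
      = (List.range (dlen N - 1)).map (fun j => ((rot N (dlen N) (1 + j) : Nat) : Int)) := by
    rw [rotations]
    simp only [digitCount_eq]
    rw [show (((dlen N : Int)) - 1).toNat = dlen N - 1 from by omega, hcast10]
    conv_lhs =>
      rw [show (N : Int) = ((rot N (dlen N) 0 : Nat) : Int) from by rw [rot_zero N (dlen N) hN]]
    rw [foldA N (dlen N) _ hN rfl (PySem.List.pyRange 1 (dlen N : Int) 1) 0 []
      (by rw [PySem.List.length_pyRange_one]; omega)]
    simp only [PySem.List.length_pyRange_one]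
    rw [show (((dlen N : Int)) - 1).toNat = dlen N - 1 from by omega]
    simp
  have hB : rotations_alt (N : Int)
      = (List.range (dlen N - 1)).map (fun j => ((rot N (dlen N) (1 + j) : Nat) : Int)) := by
    rw [rotations_alt]
    simp only [len_toStr_eq]
    rw [PySem.List.pyRange_one]
    rw [show (((dlen N : Int)) - 1).toNat = dlen N - 1 from by omega]
    rw [List.map_map]
    apply List.map_congr_left
    intro k hk
    simp only [List.mem_range] at hk
    simp only [Function.comp]
    rw [show ((dlen N : Int) - (1 + (k : Int))).toNat = dlen N - (1 + k) from by omega,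
        show ((1 : Int) + (k : Int)).toNat = 1 + k from by omega,
        hcast10, hcast10, PySem.Int.mod_natCast, PySem.Int.floordiv_natCast]
    rw [rot]
    push_cast
    ring
  rw [hA, hB]
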